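/- GENERATED by mk_final_copies.py from the proof of the farm's unit `start_decoder.4` (farm:start_decoder.4.1: Proof.lean) as the
   re-elaboration sweep compiled it — do not edit. -/
import Asan.CheckWalk
import Vorbis.Spec.Units.start_decoder_4
import Vorbis.Spec.Worked.start_decoder_4_Lemmas

open X86 X86.User Asan Vorbis Vorbis.Spec Vorbis.Spec.StartDecoder Vorbis.Spec.start_decoder_4

set_option maxRecDepth 4000
set_option maxHeartbeats 4000000

/-- Segment `start_decoder.4` (0x113d3f … 0x113d86 + the stub 0x113e3f … 0x113e4c; C lines 3669 – 3676): from `At4` — `SD 1`,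
`next_seg = 0`, rbp = f — through `start_page`, `start_packet`, `next_segment`, `get8_packet`, to the head of loop 3676 (`At5`,
r13d = 0) or, on a reader's `return FALSE` / a packet type ≠ 3 (`error(f, VORBIS_invalid_setup)`), to the epilogue (`AtERR`,
eax = 0). The segment itself stores nothing but the four return addresses; every callee writes its own stack and windows of `*f`
inside `SegWins g`; the assertion is carried over them by `seg_carry` (Lemmas.lean), `Bits f` by the callees' posts. -/
theorem Vorbis.Spec.Worked.start_decoder_4_ok : Vorbis.Spec.start_decoder_4.Statement := by
  intro Lay hLay μ hμ u₀ hcode h_sp h_spk h_ns h_g8 h_err g v hat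
  obtain ⟨A, hb⟩ := hat
  -- 1. the entry assertion's parts; the ENTRY state's facts from the carried `AtEntry` (about `g.e`)
  have fr := hb.frame
  have hh := hb.hand
  have sd := hb.sd
  have he := fr.entry
  v_entry he
  simp only [depth] at he_room he_stack
  have P := pos_of fr hh sd.bits
  -- 2. the PRESENT state under the walker's names; rsp and rbp over the entry state's registers, and NOT named `w_…` (the
  -- walker clears the `w_…` facts of the state it steps from: rsp and rbp are not written by the first instruction)
  have w_rip := fr.rip
  have hrsp := rsp_eq fr
  have hrbp : v.reg .rbp = g.e.reg .rdi := hb.rbp.trans (addr_f g)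
  have w_eq : Mem.EqOn Vorbis.L.textLo Vorbis.L.textHi u₀.mem v.mem := fr.code
  have hdf : v.flags .df = false := (show abiInv _ from fr.inv).1
  have hmx : v.mxcsr &&& 0x1F80 = 0x1F80 := (show abiInv _ from fr.inv).2
  have hsse := Vorbis.sseOK_of_abiInv fr.inv
  -- 3. the callees' contracts, for the ghosts of this activation (the own protected frame is active: `g.frames'`)
  have hsp := h_sp A.2 g.frames' (g.Blk A) g.len
  have hspk := h_spk A.2 g.frames' (g.Blk A) g.len
  have hns := h_ns A.2 g.frames' (g.Blk A) g.len
  have hg8 := h_g8 A.2 g.frames' (g.Blk A) g.len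
  have herr := h_err A.2 g.frames'
  clear h_sp h_spk h_ns h_g8 h_err
  -- 0x113d3f (line 3669): `mov rdi, rbp ; call start_page`
  u_walk hcode [hμ.vendor] until [Vorbis.L.start_decoder.cut4, Vorbis.L.start_decoder.cut42] span [Vorbis.L.textLo, Vorbis.L.textHi] side (v_side)
  case call_inv =>
    v_inv
  case pre_113d42 =>
    refine ⟨readerPre_at fr hh sd.env.live w_rsp w_rdi (by v_untouched) ?_, ?_⟩
    · rw [w_mem]
      exact bits_push P sd.bits _
    · right
      rw [w_mem, w_rdi]
      exact (next_seg_push P _).trans hb.next_seg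
  -- 0x113d47: start_page has returned
  v_after_call w_rsp_113d42 w_mem_113d42
  simp only [w_rdi_113d42] at w_same
  have hsame1 : Mem.SameExcept (SegWins g) v.mem s_113d42r.mem := by
    unfold SegWins
    u_same
  have hun1 : ShadowUntouched v.mem s_113d42r.mem := untouched_of P hsame1
  have hpost1 : StartPagePost (g.Blk A) g.len (s_113d42.reg .rdi).toNat s_113d42 s_113d42r := w_post
  rw [w_rdi_113d42] at hpost1
  have hb1 : Bits (g.Blk A) g.len s_113d42r.mem g.f := hpost1.reader.bits
  clear w_same w_post hpost1 w_code w_inv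
  obtain ⟨z1, w_rax⟩ : ∃ z, s_113d42r.reg .rax = z := ⟨_, rfl⟩
  -- `test eax, eax ; je 113b22` ; line 3671: `mov rdi, rbp ; call start_packet`
  u_walk hcode [hμ.vendor] until [Vorbis.L.start_decoder.cut4, Vorbis.L.start_decoder.cut42] span [Vorbis.L.textLo, Vorbis.L.textHi] side (v_side)
  case call_inv =>
    v_inv
  case pre_113d52 =>
    refine readerPre_at fr hh sd.env.live w_rsp w_rdi ?_ ?_
    · rw [w_mem]
      exact untouched_push P hun1 _
    · rw [w_mem]
      exact bits_push P hb1 _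
  case cont =>
    -- 0x113d49 `je` taken (line 3669 `return FALSE`): to the epilogue with eax = 0
    refine ReachVia.done (Or.inr ?_)
    exact exit_je fr hh sd w_rip w_rsp w_eq (by v_inv) w_mem hsame1 hb1 w_rax hbr_113d49
  -- 0x113d57: start_packet has returned
  v_after_call w_rsp_113d52 w_mem_113d52
  simp only [w_rdi_113d52] at w_same
  have hsame2 : Mem.SameExcept (SegWins g) v.mem s_113d52r.mem := by
    unfold SegWins
    u_same
  have hun2 : ShadowUntouched v.mem s_113d52r.mem := untouched_of P hsame2
  have hpost2 : StartPacketPost (g.Blk A) g.len (s_113d52.reg .rdi).toNat s_113d52 s_113d52r := w_post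
  rw [w_rdi_113d52] at hpost2
  have hb2 : Bits (g.Blk A) g.len s_113d52r.mem g.f := hpost2.reader.bits
  clear w_same w_post hpost2 w_code w_inv hsame1 hun1 hb1 w_rsp_113d42 w_rdi_113d42 w_kept_113d42 w_mem_113d42 w_mxcsr_113d42
  obtain ⟨z2, w_rax⟩ : ∃ z, s_113d52r.reg .rax = z := ⟨_, rfl⟩
  -- `test eax, eax ; je 113b22` ; line 3673: `mov rdi, rbp ; call next_segment`
  u_walk hcode [hμ.vendor] until [Vorbis.L.start_decoder.cut4, Vorbis.L.start_decoder.cut42] span [Vorbis.L.textLo, Vorbis.L.textHi] side (v_side)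
  case call_inv =>
    v_inv
  case pre_113d62 =>
    refine readerPre_at fr hh sd.env.live w_rsp w_rdi ?_ ?_
    · rw [w_mem]
      exact untouched_push P hun2 _
    · rw [w_mem]
      exact bits_push P hb2 _
  case cont =>
    -- 0x113d59 `je` taken (line 3671 `return FALSE`)
    refine ReachVia.done (Or.inr ?_)
    exact exit_je fr hh sd w_rip w_rsp w_eq (by v_inv) w_mem hsame2 hb2 w_rax hbr_113d59
  -- 0x113d67: next_segment has returned
  v_after_call w_rsp_113d62 w_mem_113d62
  simp only [w_rdi_113d62] at w_same
  have hsame3 : Mem.SameExcept (SegWins g) v.mem s_113d62r.mem := by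
    unfold SegWins
    u_same
  have hun3 : ShadowUntouched v.mem s_113d62r.mem := untouched_of P hsame3
  have hpost3 : NextSegmentPost (g.Blk A) g.len (s_113d62.reg .rdi).toNat s_113d62 s_113d62r := w_post
  rw [w_rdi_113d62] at hpost3
  have hb3 : Bits (g.Blk A) g.len s_113d62r.mem g.f := hpost3.reader.bits
  clear w_same w_post hpost3 w_code w_inv hsame2 hun2 hb2 w_rsp_113d52 w_rdi_113d52 w_kept_113d52 w_mem_113d52 w_mxcsr_113d52
  obtain ⟨z3, w_rax⟩ : ∃ z, s_113d62r.reg .rax = z := ⟨_, rfl⟩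
  -- `test eax, eax ; je 113b22` ; line 3675: `mov rdi, rbp ; call get8_packet`
  u_walk hcode [hμ.vendor] until [Vorbis.L.start_decoder.cut4, Vorbis.L.start_decoder.cut42] span [Vorbis.L.textLo, Vorbis.L.textHi] side (v_side)
  case call_inv =>
    v_inv
  case pre_113d72 =>
    refine readerPre_at fr hh sd.env.live w_rsp w_rdi ?_ ?_
    · rw [w_mem]
      exact untouched_push P hun3 _
    · rw [w_mem]
      exact bits_push P hb3 _
  case cont =>
    -- 0x113d69 `je` taken (line 3673 `return FALSE`)
    refine ReachVia.done (Or.inr ?_)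
    exact exit_je fr hh sd w_rip w_rsp w_eq (by v_inv) w_mem hsame3 hb3 w_rax hbr_113d69
  -- 0x113d77: get8_packet has returned
  v_after_call w_rsp_113d72 w_mem_113d72
  simp only [w_rdi_113d72] at w_same
  have hsame4 : Mem.SameExcept (SegWins g) v.mem s_113d72r.mem := by
    unfold SegWins
    u_same
  have hun4 : ShadowUntouched v.mem s_113d72r.mem := untouched_of P hsame4
  have hpost4 : Get8PacketPost (g.Blk A) g.len (s_113d72.reg .rdi).toNat s_113d72 s_113d72r := w_post
  rw [w_rdi_113d72] at hpost4
  have hb4 : Bits (g.Blk A) g.len s_113d72r.mem g.f := hpost4.reader.bits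
  clear w_same w_post hpost4 w_code w_inv hsame3 hun3 hb3 w_rsp_113d62 w_rdi_113d62 w_kept_113d62 w_mem_113d62 w_mxcsr_113d62
  obtain ⟨z4, w_rax⟩ : ∃ z, s_113d72r.reg .rax = z := ⟨_, rfl⟩
  -- `cmp eax, 3 ; jne 113e3f` ; line 3676: `mov r13d, 0 ; jmp 113e77`
  u_walk hcode [hμ.vendor] until [Vorbis.L.start_decoder.cut4, Vorbis.L.start_decoder.cut42] span [Vorbis.L.textLo, Vorbis.L.textHi] side (v_side)
  case call_inv =>
    v_inv
  case pre_113e47 =>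
    have hp := readerPre_at fr hh sd.env.live w_rsp w_rdi (s := s_113e47) ?_ ?_
    · exact ⟨hp.shadow, hp.env.obj⟩
    · rw [w_mem]
      exact untouched_push P hun4 _
    · rw [w_mem]
      exact bits_push P hb4 _
  case cont =>
    -- 0x113e4c: `error(f, VORBIS_invalid_setup)` has returned (line 3675) ; `jmp 113b22`
    v_after_call w_rsp_113e47 w_mem_113e47
    simp only [w_rdi_113e47] at w_same
    have hsame5 : Mem.SameExcept (SegWins g) v.mem s_113e47r.mem := by
      unfold SegWins
      u_same
    have hb5 : Bits (g.Blk A) g.len s_113e47r.mem g.f := bits_error P hb4 _ w_same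
    have w_rax : s_113e47r.reg .rax = 0 := w_post.1
    clear w_same w_post w_code w_inv
    u_walk hcode [hμ.vendor] until [Vorbis.L.start_decoder.cut4, Vorbis.L.start_decoder.cut42] span [Vorbis.L.textLo, Vorbis.L.textHi] side (v_side)
    refine ReachVia.done (Or.inr ?_)
    exact exit_je fr hh sd w_rip w_rsp w_eq (by v_inv) w_mem hsame5 hb5 w_rax (by decide)
  case cont =>
    -- 0x113e77 (line 3676): the head of the loop, `i = 0` in r13d
    refine ReachVia.done (Or.inl ?_)
    have hs : Mem.SameExcept (SegWins g) v.mem s_113d86.mem := by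
      rw [w_mem]
      exact hsame4
    have hb' : Bits (g.Blk A) g.len s_113d86.mem g.f := by
      rw [w_mem]
      exact hb4
    obtain ⟨fr', sd'⟩ := seg_carry fr hh sd w_rip w_rsp w_eq (by v_inv) hs (untouched_of P hs) hb'
    refine exit_loop fr' hh sd' ?_ w_r13
    rw [w_kept.get .rbp rfl]
    exact hrbp
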